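-- pv_equiv track=rewrite | github.com/yejin7211/Algorithm | 프로그래머스/unrated/159993. 미로 탈출/미로 탈출.py | solution
-- ===== SOURCE A (Python) =====
-- from collections import deque
--
-- def solution(maps):
--     n, m = len(maps), len(maps[0])
--     visited = [[[False, False] for _ in range(m)] for _ in range(n)]
--
--     dy = [-1, 1, 0, 0]
--     dx = [0, 0, -1, 1]
--
--     q = deque()
--     end_y, end_x = -1, -1
--     for i in range(n):
--         for j in range(m):
--             if maps[i][j] == 'S':
--                 q.append((i, j, 0, 0))
--                 visited[i][j][0] = True
--             if maps[i][j] == 'E':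
--                 end_y, end_x = i, j
--
--     while q:
--         y, x, k, time = q.popleft()
--         if y == end_y and x == end_x and k == 1:
--             return time
--
--         for i in range(4):
--             ny, nx = y+dy[i], x+dx[i]
--             if ny < 0 or ny >= n or nx < 0 or nx >= m:
--                 continue
--             if maps[ny][nx] != 'X':
--                 if maps[ny][nx] == 'L':
--                     if not visited[ny][nx][1]:
--                         visited[ny][nx][1] = True
--                         q.append((ny, nx, 1, time+1))
--                 elif not visited[ny][nx][k]:
--                     visited[ny][nx][k] = True
--                     q.append((ny, nx, k, time+1))
--
--     return -1
-- ===== SOURCE B (Python) =====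
-- def solution(maps):
--     n, m = len(maps), len(maps[0])
--     INF = 2 * n * m
--     dist = [[[INF, INF] for _ in range(m)] for _ in range(n)]
--     ey, ex = -1, -1
--     for i in range(n):
--         for j in range(m):
--             if maps[i][j] == 'S':
--                 dist[i][j][0] = 0
--             if maps[i][j] == 'E':
--                 ey, ex = i, j
--     changed = True
--     while changed:
--         changed = False
--         for i in range(n):
--             for j in range(m):
--                 for k in (0, 1):
--                     d = dist[i][j][k]
--                     if d == INF:
--                         continue
--                     for ni, nj in ((i - 1, j), (i + 1, j), (i, j - 1), (i, j + 1)):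
--                         if 0 <= ni < n and 0 <= nj < m and maps[ni][nj] != 'X':
--                             nk = 1 if maps[ni][nj] == 'L' else k
--                             if d + 1 < dist[ni][nj][nk]:
--                                 dist[ni][nj][nk] = d + 1
--                                 changed = True
--     if ey == -1:
--         return -1
--     d = dist[ey][ex][1]
--     return d if d < INF else -1
-- ===== Notes on version B (the rewrite author's own statement) =====
-- stated objective: alternative
-- what changed: B replaces A's BFS (deque of time-stamped states popped one by one with a 3D visited array) by dynamic programming: it builds a distance table over (row, col, lever) states initialised to 0 at starts and INF elsewhere, and repeatedly sweeps the whole grid relaxing every edge (Gauss-Seidel Bellman-Ford) until a sweep changes nothing, then reads off dist[E][1]; there is no queue and no visited structure at all.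
import Mathlib
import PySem

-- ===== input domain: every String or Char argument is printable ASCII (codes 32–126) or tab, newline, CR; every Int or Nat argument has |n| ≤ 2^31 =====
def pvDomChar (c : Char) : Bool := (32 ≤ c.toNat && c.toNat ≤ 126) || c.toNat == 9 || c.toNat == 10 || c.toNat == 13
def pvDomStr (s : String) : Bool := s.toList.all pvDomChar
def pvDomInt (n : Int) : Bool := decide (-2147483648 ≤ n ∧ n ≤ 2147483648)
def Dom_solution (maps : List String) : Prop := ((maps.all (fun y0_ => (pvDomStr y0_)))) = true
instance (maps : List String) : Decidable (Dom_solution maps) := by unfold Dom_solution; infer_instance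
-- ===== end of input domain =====

-- B replaces A's BFS (deque of time-stamped states + 3D visited array) by dynamic programming:
-- a distance table over (row, col, lever) states, swept with edge relaxations (Gauss-Seidel
-- Bellman-Ford) until a sweep changes nothing. Objective: alternative (not faster).

-- maps[y][x], shared by both ports; exact on the in-range accesses both programs perform
def pvCell (maps : List String) (y x : Int) : Char :=
  (((PySem.List.pyGet? maps y).bind (fun s => PySem.Str.pyGet? s x)).getD ' ')

-- the four moves, in both programs' order: up, down, left, right
def pvDirs : List (Int × Int) := [(-1, 0), (1, 0), (0, -1), (0, 1)]

-- ===== PORT A =====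
-- visited[ny][nx][k] (all of A's accesses are in range) is modelled by its indicator function; the
-- unconditional 'while q' loop runs on fuel 2*n*m+1, which the equivalence proof shows is never exhausted.
def solStep (maps : List String) (n m y x k time : Int)
    (st : List (Int × Int × Int × Int) × (Int × Int × Int → Bool)) (d : Int × Int) :
    List (Int × Int × Int × Int) × (Int × Int × Int → Bool) :=
  let ny := y + d.1
  let nx := x + d.2
  if ny < 0 ∨ n ≤ ny ∨ nx < 0 ∨ m ≤ nx then st
  else if pvCell maps ny nx ≠ 'X' then
    if pvCell maps ny nx = 'L' then
      if st.2 (ny, nx, 1) then st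
      else (st.1 ++ [(ny, nx, 1, time + 1)], fun v => if v = (ny, nx, (1 : Int)) then true else st.2 v)
    else
      if st.2 (ny, nx, k) then st
      else (st.1 ++ [(ny, nx, k, time + 1)], fun v => if v = (ny, nx, k) then true else st.2 v)
  else st

def solLoop (maps : List String) (n m ey ex : Int) :
    Nat → List (Int × Int × Int × Int) → (Int × Int × Int → Bool) → Int
  | 0, _, _ => -1
  | _ + 1, [], _ => -1
  | fuel + 1, (y, x, k, time) :: rest, vis =>
      if y = ey ∧ x = ex ∧ k = 1 then time
      else
        let st := pvDirs.foldl (solStep maps n m y x k time) (rest, vis)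
        solLoop maps n m ey ex fuel st.1 st.2

def solInit (maps : List String) (n m : Int) :
    List (Int × Int × Int × Int) × (Int × Int × Int → Bool) × Int × Int :=
  (PySem.List.pyRange 0 n 1).foldl (fun st i =>
    (PySem.List.pyRange 0 m 1).foldl (fun st j =>
      let st := if pvCell maps i j = 'S' then
          (st.1 ++ [(i, j, 0, 0)], (fun v => if v = (i, j, (0 : Int)) then true else st.2.1 v), st.2.2)
        else st
      if pvCell maps i j = 'E' then (st.1, st.2.1, i, j) else st) st)
    ([], fun _ => false, -1, -1)

def solution (maps : List String) : Int :=
  let n : Int := (maps.length : Int)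
  let m : Int := ((PySem.Str.len ((PySem.List.pyGet? maps 0).getD "")) : Int)
  let st := solInit maps n m
  solLoop maps n m st.2.2.1 st.2.2.2
    (2 * maps.length * (PySem.Str.len ((PySem.List.pyGet? maps 0).getD "")).toNat + 1) st.1 st.2.1

-- ===== PORT B =====
-- B's 3D dist list (value INF = 2*n*m means 'not yet reached') is modelled by its lookup function.
-- one relaxation of the edge into the absolute neighbour cell p, from a state with lever k, distance d
def bfRelax (maps : List String) (n m k d : Int)
    (st : ((Int × Int × Int) → Int) × Bool) (p : Int × Int) :
    ((Int × Int × Int) → Int) × Bool :=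
  if 0 ≤ p.1 ∧ p.1 < n ∧ 0 ≤ p.2 ∧ p.2 < m ∧ pvCell maps p.1 p.2 ≠ 'X' then
    let nk : Int := if pvCell maps p.1 p.2 = 'L' then 1 else k
    if d + 1 < st.1 (p.1, p.2, nk) then
      ((fun v => if v = (p.1, p.2, nk) then d + 1 else st.1 v), true)
    else st
  else st

-- the four neighbour cells of (i, j), in B's order
def bfNbrs (i j : Int) : List (Int × Int) := [(i - 1, j), (i + 1, j), (i, j - 1), (i, j + 1)]

-- the body for one lever value k at cell (i, j): read d once, skip if INF, else relax the 4 edges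
def bfCellK (maps : List String) (n m i j : Int)
    (st : ((Int × Int × Int) → Int) × Bool) (k : Int) :
    ((Int × Int × Int) → Int) × Bool :=
  let d := st.1 (i, j, k)
  if d = 2 * n * m then st
  else (bfNbrs i j).foldl (bfRelax maps n m k d) st

-- one full sweep of the grid; the Bool is Python's 'changed' flag (False on entry)
def bfSweep (maps : List String) (n m : Int) (dist : (Int × Int × Int) → Int) :
    ((Int × Int × Int) → Int) × Bool :=
  (PySem.List.pyRange 0 n 1).foldl (fun st i =>
    (PySem.List.pyRange 0 m 1).foldl (fun st j =>
      ([0, 1] : List Int).foldl (bfCellK maps n m i j) st) st) (dist, false)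

-- 'while changed' on fuel (2*n*m)^2+1; the proof shows the fixpoint is reached before it runs out
def bfLoop (maps : List String) (n m : Int) :
    Nat → ((Int × Int × Int) → Int) → ((Int × Int × Int) → Int)
  | 0, dist => dist
  | fuel + 1, dist =>
      let st := bfSweep maps n m dist
      if st.2 then bfLoop maps n m fuel st.1 else st.1

-- the init scan: dist[i][j][0] = 0 at 'S', and (ey, ex) from the last 'E'
def bfInit (maps : List String) (n m : Int) :
    ((Int × Int × Int) → Int) × Int × Int :=
  (PySem.List.pyRange 0 n 1).foldl (fun st i =>
    (PySem.List.pyRange 0 m 1).foldl (fun st j =>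
      let st := if pvCell maps i j = 'S' then
          ((fun v => if v = (i, j, (0 : Int)) then 0 else st.1 v), st.2)
        else st
      if pvCell maps i j = 'E' then (st.1, i, j) else st) st)
    ((fun _ => 2 * n * m), -1, -1)

def solution_alt (maps : List String) : Int :=
  let n : Int := (maps.length : Int)
  let m : Int := ((PySem.Str.len ((PySem.List.pyGet? maps 0).getD "")) : Int)
  let st := bfInit maps n m
  let dist := bfLoop maps n m
    (2 * maps.length * (PySem.Str.len ((PySem.List.pyGet? maps 0).getD "")).toNat
      * (2 * maps.length * (PySem.Str.len ((PySem.List.pyGet? maps 0).getD "")).toNat) + 1)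
    st.1
  if st.2.1 = -1 then -1
  else if dist (st.2.1, st.2.2, 1) < 2 * n * m then dist (st.2.1, st.2.2, 1) else -1

-- ===== PRECONDITION & SPEC =====
-- Pre_ excludes exactly the inputs where Python A raises an IndexError: the empty list (maps[0])
-- and maps whose later rows are shorter than the first row (maps[i][j] for j < len(maps[0])).
def Pre_solution (maps : List String) : Prop :=
  maps ≠ [] ∧ ∀ s ∈ maps, PySem.Str.len ((PySem.List.pyGet? maps 0).getD "") ≤ PySem.Str.len s
instance (maps : List String) : Decidable (Pre_solution maps) := by unfold Pre_solution; infer_instance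

def pvWitness_solution : List String := ["SOLE"]

def Spec_solution (maps : List String) (out : Int) : Prop := out = solution_alt maps
instance (maps : List String) (out : Int) : Decidable (Spec_solution maps out) := by unfold Spec_solution; infer_instance

-- ===== CLAIM (what is proved, stated in full; the proofs are below) =====
def Claim_equal_solution : Prop := ∀ (maps : List String), Dom_solution maps → Pre_solution maps → Spec_solution maps (solution maps)

-- ===== LEMMAS AND PROOFS =====

-- ---- proof-side level BFS (the common reference point): frontier expansion over (row, col, lever) states
def altStep (maps : List String) (n m : Int) (s : Int × Int × Int)
    (st : List (Int × Int × Int) × List (Int × Int × Int)) (d : Int × Int) :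
    List (Int × Int × Int) × List (Int × Int × Int) :=
  let ny := s.1 + d.1
  let nx := s.2.1 + d.2
  if 0 ≤ ny ∧ ny < n ∧ 0 ≤ nx ∧ nx < m ∧ pvCell maps ny nx ≠ 'X' then
    let nk : Int := if pvCell maps ny nx = 'L' then 1 else s.2.2
    if (ny, nx, nk) ∈ st.2 then st
    else (st.1 ++ [(ny, nx, nk)], st.2 ++ [(ny, nx, nk)])
  else st

def altExpand (maps : List String) (n m : Int)
    (st : List (Int × Int × Int) × List (Int × Int × Int)) (s : Int × Int × Int) :
    List (Int × Int × Int) × List (Int × Int × Int) :=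
  pvDirs.foldl (altStep maps n m s) st

def altLoop (maps : List String) (n m : Int) (tgt : Option (Int × Int × Int)) :
    Nat → List (Int × Int × Int) → List (Int × Int × Int) → Int → Int
  | 0, _, _, _ => -1
  | fuel + 1, frontier, seen, t =>
      if frontier = [] then -1
      else if tgt.any (fun g => frontier.contains g) then t
      else
        let st := frontier.foldl (altExpand maps n m) ([], seen)
        altLoop maps n m tgt fuel st.1 st.2 (t + 1)

def altStarts (maps : List String) (n m : Int) : List (Int × Int × Int) :=
  (PySem.List.pyRange 0 n 1).flatMap (fun i =>
    (PySem.List.pyRange 0 m 1).filterMap (fun j =>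
      if pvCell maps i j = 'S' then some (i, j, (0 : Int)) else none))

def altEnd (maps : List String) (n m : Int) : Option (Int × Int) :=
  (PySem.List.pyRange 0 n 1).foldl (fun e i =>
    (PySem.List.pyRange 0 m 1).foldl (fun e j =>
      if pvCell maps i j = 'E' then some (i, j) else e) e) none

-- ---- reachability levels: RL t = states reachable from the starts in ≤ t moves
def pvSuccs (maps : List String) (n m : Int) (s : Int × Int × Int) : List (Int × Int × Int) :=
  pvDirs.filterMap (fun d =>
    let ny := s.1 + d.1
    let nx := s.2.1 + d.2
    if 0 ≤ ny ∧ ny < n ∧ 0 ≤ nx ∧ nx < m ∧ pvCell maps ny nx ≠ 'X' then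
      some (ny, nx, if pvCell maps ny nx = 'L' then 1 else s.2.2)
    else none)

def pvRL (maps : List String) (n m : Int) : Nat → List (Int × Int × Int)
  | 0 => altStarts maps n m
  | t + 1 => pvRL maps n m t ++ (pvRL maps n m t).flatMap (pvSuccs maps n m)

def pvHitB (maps : List String) (n m : Int) (tgtO : Option (Int × Int × Int)) (s : Nat) : Bool :=
  match tgtO with
  | some g => decide (g ∈ pvRL maps n m s)
  | none => false

def pvStamp (t : Int) (s : Int × Int × Int) : Int × Int × Int × Int := (s.1, s.2.1, s.2.2, t)
def pvSeen (seen : List (Int × Int × Int)) : (Int × Int × Int) → Bool := fun v => decide (v ∈ seen)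

def pvInB (n m : Int) (s : Int × Int × Int) : Prop :=
  0 ≤ s.1 ∧ s.1 < n ∧ 0 ≤ s.2.1 ∧ s.2.1 < m ∧ (s.2.2 = 0 ∨ s.2.2 = 1)

def pvUniv (N M : Nat) : List (Int × Int × Int) :=
  (List.range N).flatMap (fun (i : Nat) => (List.range M).flatMap (fun (j : Nat) =>
    [((i : Int), (j : Int), (0 : Int)), ((i : Int), (j : Int), (1 : Int))]))

def pvPhi (N M : Nat) (dist : (Int × Int × Int) → Int) : Nat :=
  ((pvUniv N M).map (fun v => (dist v).toNat)).sum

def pvEndRel (e : Option (Int × Int)) (ey ex : Int) : Prop :=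
  match e with
  | none => ey = -1 ∧ ex = -1
  | some p => ey = p.1 ∧ ex = p.2

theorem pvSeen_eq_true (seen : List (Int × Int × Int)) (v : Int × Int × Int) :
    pvSeen seen v = true ↔ v ∈ seen := by simp [pvSeen]

theorem pvSeen_mark (seen : List (Int × Int × Int)) (p : Int × Int × Int) :
    (fun v => decide (v = p) || pvSeen seen v) = pvSeen (seen ++ [p]) := by
  funext v
  by_cases h : v = p <;> simp [pvSeen, h]

theorem pv_step (maps : List String) (n m : Int) (s : Int × Int × Int) (t : Int)
    (d : Int × Int) (pend acc seen : List (Int × Int × Int)) :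
    solStep maps n m s.1 s.2.1 s.2.2 t (pend.map (pvStamp t) ++ acc.map (pvStamp (t + 1)), pvSeen seen) d
    = (pend.map (pvStamp t) ++ (altStep maps n m s (acc, seen) d).1.map (pvStamp (t + 1)),
       pvSeen (altStep maps n m s (acc, seen) d).2) := by
  unfold solStep altStep
  by_cases hb : 0 ≤ s.1 + d.1 ∧ s.1 + d.1 < n ∧ 0 ≤ s.2.1 + d.2 ∧ s.2.1 + d.2 < m
  · have hA : ¬(s.1 + d.1 < 0 ∨ n ≤ s.1 + d.1 ∨ s.2.1 + d.2 < 0 ∨ m ≤ s.2.1 + d.2) := by omega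
    by_cases hx : pvCell maps (s.1 + d.1) (s.2.1 + d.2) ≠ 'X'
    · have hB : 0 ≤ s.1 + d.1 ∧ s.1 + d.1 < n ∧ 0 ≤ s.2.1 + d.2 ∧ s.2.1 + d.2 < m ∧
          pvCell maps (s.1 + d.1) (s.2.1 + d.2) ≠ 'X' := ⟨hb.1, hb.2.1, hb.2.2.1, hb.2.2.2, hx⟩
      by_cases hl : pvCell maps (s.1 + d.1) (s.2.1 + d.2) = 'L'
      · by_cases hm : (s.1 + d.1, s.2.1 + d.2, (1 : Int)) ∈ seen
        · simp [hA, hB, hl, hm, pvSeen_eq_true]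
        · simp only [if_neg hA, if_pos hx, if_pos hB, if_pos hl]
          rw [if_neg (by simp [pvSeen_eq_true, hm]), if_neg (by simpa using hm)]
          simp [pvSeen_mark, pvStamp, List.map_append, List.append_assoc]
      · by_cases hm : (s.1 + d.1, s.2.1 + d.2, s.2.2) ∈ seen
        · simp [hA, hB, hl, hm, pvSeen_eq_true]
        · simp only [if_neg hA, if_pos hx, if_pos hB, if_neg hl]
          rw [if_neg (by simp [pvSeen_eq_true, hm]), if_neg (by simpa using hm)]
          simp [pvSeen_mark, pvStamp, List.map_append, List.append_assoc]
    · rw [if_neg hA, if_neg hx, if_neg (fun h => hx h.2.2.2.2)]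
  · rw [if_pos (by omega), if_neg (fun h => hb ⟨h.1, h.2.1, h.2.2.1, h.2.2.2.1⟩)]

theorem pv_expand (maps : List String) (n m : Int) (s : Int × Int × Int) (t : Int)
    (dirs : List (Int × Int)) (pend acc seen : List (Int × Int × Int)) :
    dirs.foldl (solStep maps n m s.1 s.2.1 s.2.2 t) (pend.map (pvStamp t) ++ acc.map (pvStamp (t + 1)), pvSeen seen)
    = (pend.map (pvStamp t) ++ (dirs.foldl (altStep maps n m s) (acc, seen)).1.map (pvStamp (t + 1)),
       pvSeen (dirs.foldl (altStep maps n m s) (acc, seen)).2) := by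
  induction dirs generalizing acc seen with
  | nil => rfl
  | cons d ds ih =>
      simp only [List.foldl_cons, pv_step]
      exact ih (altStep maps n m s (acc, seen) d).1 (altStep maps n m s (acc, seen) d).2

theorem pv_step_shape (maps : List String) (n m : Int) (s : Int × Int × Int)
    (st : List (Int × Int × Int) × List (Int × Int × Int)) (d : Int × Int)
    (hs : s.2.2 = 0 ∨ s.2.2 = 1) :
    altStep maps n m s st d = st ∨
    ∃ p, p ∉ st.2 ∧ pvInB n m p ∧ altStep maps n m s st d = (st.1 ++ [p], st.2 ++ [p]) := by
  unfold altStep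
  by_cases hB : 0 ≤ s.1 + d.1 ∧ s.1 + d.1 < n ∧ 0 ≤ s.2.1 + d.2 ∧ s.2.1 + d.2 < m ∧
      pvCell maps (s.1 + d.1) (s.2.1 + d.2) ≠ 'X'
  · by_cases hl : pvCell maps (s.1 + d.1) (s.2.1 + d.2) = 'L'
    · by_cases hm : (s.1 + d.1, s.2.1 + d.2, (1 : Int)) ∈ st.2
      · left; simp [hB, hl, hm]
      · right
        exact ⟨(s.1 + d.1, s.2.1 + d.2, 1), hm,
          ⟨hB.1, hB.2.1, hB.2.2.1, hB.2.2.2.1, Or.inr rfl⟩, by simp [hB, hl, hm]⟩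
    · by_cases hm : (s.1 + d.1, s.2.1 + d.2, s.2.2) ∈ st.2
      · left; simp [hB, hl, hm]
      · right
        exact ⟨(s.1 + d.1, s.2.1 + d.2, s.2.2), hm,
          ⟨hB.1, hB.2.1, hB.2.2.1, hB.2.2.2.1, hs⟩, by simp [hB, hl, hm]⟩
  · left; rw [if_neg hB]

theorem pv_expand_shape (maps : List String) (n m : Int) (s : Int × Int × Int)
    (dirs : List (Int × Int)) (acc seen : List (Int × Int × Int))
    (hs : s.2.2 = 0 ∨ s.2.2 = 1) :
    ∃ l, dirs.foldl (altStep maps n m s) (acc, seen) = (acc ++ l, seen ++ l)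
      ∧ (∀ p ∈ l, pvInB n m p)
      ∧ (seen.Nodup → (seen ++ l).Nodup) := by
  induction dirs generalizing acc seen with
  | nil => exact ⟨[], by simp⟩
  | cons d ds ih =>
      rcases pv_step_shape maps n m s (acc, seen) d hs with h | ⟨p, hp, hpb, h⟩
      · simpa [h] using ih acc seen
      · rcases ih (acc ++ [p]) (seen ++ [p]) with ⟨l, hl, hlb, hln⟩
        refine ⟨p :: l, ?_, ?_, ?_⟩
        · simpa [h, List.append_assoc] using hl
        · intro q hq
          rcases List.mem_cons.mp hq with hq | hq
          · exact hq ▸ hpb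
          · exact hlb q hq
        · intro hnd
          have hps : (seen ++ [p]).Nodup := by
            refine List.Nodup.append hnd (List.nodup_singleton p) ?_
            intro x hx hxp
            rcases List.mem_singleton.mp hxp with rfl
            exact hp hx
          simpa [List.append_assoc] using hln hps

theorem pv_expandAll_shape (maps : List String) (n m : Int)
    (fr : List (Int × Int × Int)) (acc seen : List (Int × Int × Int))
    (hf : ∀ s ∈ fr, s.2.2 = 0 ∨ s.2.2 = 1) :
    ∃ l, fr.foldl (altExpand maps n m) (acc, seen) = (acc ++ l, seen ++ l)
      ∧ (∀ p ∈ l, pvInB n m p)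
      ∧ (seen.Nodup → (seen ++ l).Nodup) := by
  induction fr generalizing acc seen with
  | nil => exact ⟨[], by simp⟩
  | cons s fr ih =>
      rcases pv_expand_shape maps n m s pvDirs acc seen (hf s (by simp)) with ⟨l1, h1, h1b, h1n⟩
      rcases ih (acc ++ l1) (seen ++ l1) (fun q hq => hf q (by simp [hq])) with ⟨l2, h2, h2b, h2n⟩
      refine ⟨l1 ++ l2, ?_, ?_, ?_⟩
      · simp only [List.foldl_cons, altExpand, h1, h2, List.append_assoc]
      · intro q hq
        rcases List.mem_append.mp hq with hq | hq
        · exact h1b q hq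
        · exact h2b q hq
      · intro hnd
        simpa [List.append_assoc] using h2n (h1n hnd)

theorem pv_emptyA (maps : List String) (n m ey ex : Int) (f : Nat) (vis : Int × Int × Int → Bool) :
    solLoop maps n m ey ex f [] vis = -1 := by
  cases f <;> rfl

theorem pv_emptyB (maps : List String) (n m : Int) (tgt : Option (Int × Int × Int))
    (f : Nat) (seen : List (Int × Int × Int)) (t : Int) :
    altLoop maps n m tgt f [] seen t = -1 := by
  cases f <;> simp [altLoop]

theorem pv_consume (maps : List String) (n m ey ex : Int) (t : Int)
    (pend acc seen : List (Int × Int × Int)) (fuel : Nat) :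
    solLoop maps n m ey ex (fuel + pend.length)
        (pend.map (pvStamp t) ++ acc.map (pvStamp (t + 1))) (pvSeen seen)
    = if (ey, ex, (1 : Int)) ∈ pend then t
      else solLoop maps n m ey ex fuel
        ((pend.foldl (altExpand maps n m) (acc, seen)).1.map (pvStamp (t + 1)))
        (pvSeen (pend.foldl (altExpand maps n m) (acc, seen)).2) := by
  induction pend generalizing acc seen with
  | nil => simp
  | cons s pend ih =>
      rw [show fuel + (s :: pend).length = (fuel + pend.length) + 1 by
        simp only [List.length_cons]; omega]
      simp only [List.map_cons, List.cons_append, pvStamp]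
      rw [solLoop]
      by_cases hts : s = (ey, ex, (1 : Int))
      · rw [if_pos (by subst hts; exact ⟨rfl, rfl, rfl⟩)]
        rw [if_pos (by simp [hts])]
      · rw [if_neg (by
          rintro ⟨h1, h2, h3⟩
          exact hts (by rcases s with ⟨a, b, c⟩; simp_all))]
        simp only [pv_expand]
        rw [ih (pvDirs.foldl (altStep maps n m s) (acc, seen)).1
               (pvDirs.foldl (altStep maps n m s) (acc, seen)).2]
        by_cases hmem : (ey, ex, (1 : Int)) ∈ pend
        · rw [if_pos hmem, if_pos (List.mem_cons_of_mem s hmem)]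
        · rw [if_neg hmem, if_neg (by
            intro h
            rcases List.mem_cons.mp h with h | h
            · exact hts h.symm
            · exact hmem h)]
          simp only [List.foldl_cons, altExpand]

theorem mem_pvUniv (N M : Nat) (p : Int × Int × Int) :
    p ∈ pvUniv N M ↔ pvInB (N : Int) (M : Int) p := by
  rcases p with ⟨y, x, k⟩
  constructor
  · intro hp
    rcases List.mem_flatMap.mp hp with ⟨i, hi, hp2⟩
    rcases List.mem_flatMap.mp hp2 with ⟨j, hj, hp3⟩
    have hiN := List.mem_range.mp hi
    have hjM := List.mem_range.mp hj
    have hiI : (i : Int) < (N : Int) := by exact_mod_cast hiN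
    have hjI : (j : Int) < (M : Int) := by exact_mod_cast hjM
    simp only [List.mem_cons, List.not_mem_nil, or_false] at hp3
    rcases hp3 with h | h <;>
      · rw [Prod.mk.injEq, Prod.mk.injEq] at h
        refine ⟨?_, ?_, ?_, ?_, ?_⟩ <;> simp [← h.2.2] <;> omega
  · rintro ⟨h1, h2, h3, h4, h5⟩
    simp only at h1 h2 h3 h4 h5
    have hyN : y.toNat < N := by omega
    have hxM : x.toNat < M := by omega
    apply List.mem_flatMap.mpr
    refine ⟨y.toNat, List.mem_range.mpr hyN, ?_⟩
    apply List.mem_flatMap.mpr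
    refine ⟨x.toNat, List.mem_range.mpr hxM, ?_⟩
    have hy : ((y.toNat : Int)) = y := by omega
    have hx : ((x.toNat : Int)) = x := by omega
    rcases h5 with h5 | h5 <;> simp [hy, hx, h5]

theorem pvUniv_len (N M : Nat) : (pvUniv N M).length = 2 * N * M := by
  simp [pvUniv, List.length_flatMap, List.map_const']
  ring

theorem pv_card (N M : Nat) (seen : List (Int × Int × Int)) (hnd : seen.Nodup)
    (hb : ∀ p ∈ seen, pvInB (N : Int) (M : Int) p) : seen.length ≤ 2 * N * M := by
  have hsub : seen ⊆ pvUniv N M := fun p hp => (mem_pvUniv N M p).mpr (hb p hp)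
  calc seen.length ≤ _ := (hnd.subperm hsub).length_le
    _ = 2 * N * M := pvUniv_len N M

theorem pvSeen_mark_ite (seen : List (Int × Int × Int)) (p : Int × Int × Int) :
    (fun v => if v = p then true else pvSeen seen v) = pvSeen (seen ++ [p]) := by
  funext v
  by_cases h : v = p <;> simp [pvSeen, h]

theorem pv_init_inner (maps : List String) (i : Int) (js : List Int) :
    ∀ (S0 : List (Int × Int × Int)) (e : Option (Int × Int)) (ey ex : Int),
      pvEndRel e ey ex →
      ∃ ey' ex',
        js.foldl (fun st j =>
            let st := if pvCell maps i j = 'S' then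
                (st.1 ++ [(i, j, 0, 0)], (fun v => if v = (i, j, (0 : Int)) then true else st.2.1 v), st.2.2)
              else st
            if pvCell maps i j = 'E' then (st.1, st.2.1, i, j) else st)
          (S0.map (pvStamp 0), pvSeen S0, ey, ex)
        = ((S0 ++ js.filterMap (fun j => if pvCell maps i j = 'S' then some (i, j, (0 : Int)) else none)).map (pvStamp 0),
           pvSeen (S0 ++ js.filterMap (fun j => if pvCell maps i j = 'S' then some (i, j, (0 : Int)) else none)),
           ey', ex')
        ∧ pvEndRel (js.foldl (fun e j => if pvCell maps i j = 'E' then some (i, j) else e) e) ey' ex' := by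
  induction js with
  | nil => exact fun S0 e ey ex h => ⟨ey, ex, by simp, h⟩
  | cons j js ih =>
      intro S0 e ey ex h
      simp only [List.foldl_cons]
      by_cases cS : pvCell maps i j = 'S'
      · have cE : ¬ pvCell maps i j = 'E' := by rw [cS]; decide
        rw [if_neg cE, if_pos cS,
            show S0.map (pvStamp 0) ++ [(i, j, 0, 0)] = (S0 ++ [(i, j, (0 : Int))]).map (pvStamp 0) from by
              simp [pvStamp],
            pvSeen_mark_ite]
        rcases ih (S0 ++ [(i, j, (0 : Int))]) e ey ex h with ⟨ey', ex', h1, h2⟩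
        refine ⟨ey', ex', ?_, ?_⟩
        · rw [h1]
          simp [cS, List.append_assoc]
        · simpa [cE] using h2
      · by_cases cE : pvCell maps i j = 'E'
        · rw [if_pos cE, if_neg cS]
          rcases ih S0 (some (i, j)) i j ⟨rfl, rfl⟩ with ⟨ey', ex', h1, h2⟩
          refine ⟨ey', ex', ?_, ?_⟩
          · rw [show ((S0.map (pvStamp 0), pvSeen S0, ey, ex).1, (S0.map (pvStamp 0), pvSeen S0, ey, ex).2.1, i, j)
                = ((S0.map (pvStamp 0)), pvSeen S0, i, j) from rfl]
            rw [h1]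
            simp [cS]
          · simpa [cE] using h2
        · rw [if_neg cE, if_neg cS]
          rcases ih S0 e ey ex h with ⟨ey', ex', h1, h2⟩
          refine ⟨ey', ex', ?_, ?_⟩
          · rw [h1]
            simp [cS]
          · simpa [cE] using h2

theorem pv_init_outer (maps : List String) (m : Int) (is : List Int) :
    ∀ (S0 : List (Int × Int × Int)) (e : Option (Int × Int)) (ey ex : Int),
      pvEndRel e ey ex →
      ∃ ey' ex',
        is.foldl (fun st i =>
            (PySem.List.pyRange 0 m 1).foldl (fun st j =>
              let st := if pvCell maps i j = 'S' then
                  (st.1 ++ [(i, j, 0, 0)], (fun v => if v = (i, j, (0 : Int)) then true else st.2.1 v), st.2.2)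
                else st
              if pvCell maps i j = 'E' then (st.1, st.2.1, i, j) else st) st)
          (S0.map (pvStamp 0), pvSeen S0, ey, ex)
        = ((S0 ++ is.flatMap (fun i => (PySem.List.pyRange 0 m 1).filterMap
              (fun j => if pvCell maps i j = 'S' then some (i, j, (0 : Int)) else none))).map (pvStamp 0),
           pvSeen (S0 ++ is.flatMap (fun i => (PySem.List.pyRange 0 m 1).filterMap
              (fun j => if pvCell maps i j = 'S' then some (i, j, (0 : Int)) else none))),
           ey', ex')
        ∧ pvEndRel (is.foldl (fun e i => (PySem.List.pyRange 0 m 1).foldl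
            (fun e j => if pvCell maps i j = 'E' then some (i, j) else e) e) e) ey' ex' := by
  induction is with
  | nil => exact fun S0 e ey ex h => ⟨ey, ex, by simp, h⟩
  | cons i is ih =>
      intro S0 e ey ex h
      simp only [List.foldl_cons]
      rcases pv_init_inner maps i (PySem.List.pyRange 0 m 1) S0 e ey ex h with ⟨ey1, ex1, h1, h2⟩
      rw [h1]
      rcases ih (S0 ++ (PySem.List.pyRange 0 m 1).filterMap
          (fun j => if pvCell maps i j = 'S' then some (i, j, (0 : Int)) else none))
          ((PySem.List.pyRange 0 m 1).foldl (fun e j => if pvCell maps i j = 'E' then some (i, j) else e) e)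
          ey1 ex1 h2 with ⟨ey', ex', h3, h4⟩
      rw [h3]
      exact ⟨ey', ex', by simp [List.append_assoc], h4⟩

theorem pv_init (maps : List String) (n m : Int) :
    ∃ ey ex, solInit maps n m
      = ((altStarts maps n m).map (pvStamp 0), pvSeen (altStarts maps n m), ey, ex)
      ∧ pvEndRel (altEnd maps n m) ey ex := by
  unfold solInit altStarts altEnd
  rcases pv_init_outer maps m (PySem.List.pyRange 0 n 1) [] none (-1) (-1) ⟨rfl, rfl⟩ with ⟨ey, ex, h1, h2⟩
  refine ⟨ey, ex, ?_, h2⟩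
  rw [show (([] : List (Int × Int × Int × Int)), (fun _ : Int × Int × Int => false), (-1 : Int), (-1 : Int))
      = ((([] : List (Int × Int × Int)).map (pvStamp 0)), pvSeen [], (-1 : Int), (-1 : Int)) from by
    refine congrArg (fun f => (([] : List (Int × Int × Int)).map (pvStamp 0), f, (-1 : Int), (-1 : Int))) ?_
    funext v
    simp [pvSeen]]
  rw [h1]
  simp

theorem pv_starts_inb (maps : List String) (n m : Int) :
    ∀ p ∈ altStarts maps n m, pvInB n m p := by
  intro p hp
  unfold altStarts at hp
  rcases List.mem_flatMap.mp hp with ⟨i, hi, hp2⟩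
  rcases List.mem_filterMap.mp hp2 with ⟨j, hj, hif⟩
  by_cases c : pvCell maps i j = 'S'
  · rw [if_pos c] at hif
    rcases Option.some_inj.mp hif with rfl
    rcases PySem.List.mem_pyRange_one.mp hi with ⟨h1, h2⟩
    rcases PySem.List.mem_pyRange_one.mp hj with ⟨h3, h4⟩
    exact ⟨h1, h2, h3, h4, Or.inl rfl⟩
  · rw [if_neg c] at hif
    cases hif

theorem pv_starts_nodup (maps : List String) (n m : Int) :
    (altStarts maps n m).Nodup := by
  unfold altStarts
  refine List.nodup_flatMap.mpr ⟨?_, ?_⟩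
  · intro i _
    refine List.Nodup.filterMap ?_ (PySem.List.nodup_pyRange_one 0 m)
    intro a a' b hb hb'
    simp only [Option.mem_def] at hb hb'
    split_ifs at hb hb' with c c'
    · rw [Option.some_inj] at hb hb'
      have h12 : ((i, a, (0 : Int)) : Int × Int × Int) = (i, a', 0) := by rw [hb, ← hb']
      simpa using h12
  · refine (PySem.List.pairwise_lt_pyRange_one 0 n).imp ?_
    intro a b hab
    intro p hp hp'
    rcases List.mem_filterMap.mp hp with ⟨j, _, hj⟩
    rcases List.mem_filterMap.mp hp' with ⟨j', _, hj'⟩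
    by_cases c : pvCell maps a j = 'S'
    · by_cases c' : pvCell maps b j' = 'S'
      · rw [if_pos c] at hj
        rw [if_pos c'] at hj'
        rcases Option.some_inj.mp hj with rfl
        have := congrArg (fun q => q.1) (Option.some_inj.mp hj')
        simp at this
        omega
      · rw [if_neg c'] at hj'; cases hj'
    · rw [if_neg c] at hj; cases hj

theorem pv_main (maps : List String) (N M : Nat) (ey ex : Int) (tgt : Option (Int × Int × Int))
    (htg : tgt = some (ey, ex, 1) ∨ (tgt = none ∧ ey = -1)) :
    ∀ (fB fA : Nat) (fr seen : List (Int × Int × Int)) (t : Int),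
      seen.Nodup → (∀ p ∈ seen, pvInB (N : Int) (M : Int) p) → fr ⊆ seen →
      fr.length + (2 * N * M - seen.length) ≤ fA →
      1 + (2 * N * M - seen.length) ≤ fB →
      solLoop maps (N : Int) (M : Int) ey ex fA (fr.map (pvStamp t)) (pvSeen seen)
        = altLoop maps (N : Int) (M : Int) tgt fB fr seen t := by
  intro fB
  induction fB with
  | zero => intro fA fr seen t _ _ _ _ hfB; omega
  | succ fB ih =>
      intro fA fr seen t hnd hb hsub hfA hfB
      by_cases hfr : fr = []
      · subst hfr
        simp only [List.map_nil]
        rw [pv_emptyA, pv_emptyB]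
      · have hBc : (tgt.any (fun g => fr.contains g)) = true ↔ (ey, ex, (1 : Int)) ∈ fr := by
          rcases htg with htg | ⟨htg, hey⟩ <;> subst htg
          · simp
          · simp only [Option.any_none]
            refine ⟨fun h => by simp at h, fun hmem => ?_⟩
            have h0 := (hb _ (hsub hmem)).1
            simp only at h0
            omega
        rw [show fA = (fA - fr.length) + fr.length by omega,
            show fr.map (pvStamp t) = fr.map (pvStamp t) ++ ([] : List (Int × Int × Int)).map (pvStamp (t + 1)) by simp]
        rw [pv_consume]
        rw [altLoop]
        rw [if_neg hfr]
        by_cases hmem : (ey, ex, (1 : Int)) ∈ fr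
        · rw [if_pos hmem, if_pos (hBc.mpr hmem)]
        · rw [if_neg hmem, if_neg (fun h => hmem (hBc.mp h))]
          rcases pv_expandAll_shape maps (N : Int) (M : Int) fr [] seen
              (fun s hs => (hb s (hsub hs)).2.2.2.2) with ⟨l, hsh, hlb, hln⟩
          simp only [hsh, List.nil_append]
          by_cases hl0 : l = []
          · subst hl0
            simp only [List.map_nil]
            rw [pv_emptyA, pv_emptyB]
          · have hnd' : (seen ++ l).Nodup := hln hnd
            have hb' : ∀ p ∈ seen ++ l, pvInB (N : Int) (M : Int) p := by
              intro p hp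
              rcases List.mem_append.mp hp with hp | hp
              · exact hb p hp
              · exact hlb p hp
            have hcard : (seen ++ l).length ≤ 2 * N * M := pv_card N M _ hnd' hb'
            have hlp : 0 < l.length := List.length_pos_iff.mpr hl0
            have hla : (seen ++ l).length = seen.length + l.length := List.length_append
            exact ih (fA - fr.length) l (seen ++ l) (t + 1) hnd' hb'
              (List.subset_append_right seen l) (by omega) (by omega)

-- ---- RL basics
theorem pvRL_succ_mem (maps : List String) (n m : Int) (t : Nat) (v : Int × Int × Int) :
    v ∈ pvRL maps n m (t + 1) ↔ v ∈ pvRL maps n m t ∨ ∃ u ∈ pvRL maps n m t, v ∈ pvSuccs maps n m u := by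
  simp [pvRL]

theorem pvRL_mono (maps : List String) (n m : Int) {t s : Nat} (h : t ≤ s) {v : Int × Int × Int}
    (hv : v ∈ pvRL maps n m t) : v ∈ pvRL maps n m s := by
  induction s, h using Nat.le_induction with
  | base => exact hv
  | succ s hs ih => exact (pvRL_succ_mem maps n m s v).mpr (Or.inl ih)

theorem pvRL_stable (maps : List String) (n m : Int) (t : Nat)
    (hst : ∀ v, v ∈ pvRL maps n m (t + 1) → v ∈ pvRL maps n m t) :
    ∀ s, t ≤ s → ∀ v, v ∈ pvRL maps n m s → v ∈ pvRL maps n m t := by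
  intro s hs
  induction s, hs using Nat.le_induction with
  | base => exact fun v hv => hv
  | succ s hts ih =>
      intro v hv
      rcases (pvRL_succ_mem maps n m s v).mp hv with h | ⟨u, hu, hsucc⟩
      · exact ih v h
      · exact hst v ((pvRL_succ_mem maps n m t v).mpr (Or.inr ⟨u, ih u hu, hsucc⟩))

theorem pv_succs_inB (maps : List String) (n m : Int) (u : Int × Int × Int)
    (hu : u.2.2 = 0 ∨ u.2.2 = 1) :
    ∀ p ∈ pvSuccs maps n m u, pvInB n m p := by
  intro p hp
  simp only [pvSuccs, List.mem_filterMap] at hp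
  rcases hp with ⟨dd, hd, hif⟩
  split_ifs at hif with hg hl
  · rcases Option.some_inj.mp hif with rfl
    exact ⟨hg.1, hg.2.1, hg.2.2.1, hg.2.2.2.1, Or.inr rfl⟩
  · rcases Option.some_inj.mp hif with rfl
    exact ⟨hg.1, hg.2.1, hg.2.2.1, hg.2.2.2.1, hu⟩

theorem pvRL_inB (maps : List String) (n m : Int) (t : Nat) :
    ∀ p ∈ pvRL maps n m t, pvInB n m p := by
  induction t with
  | zero => exact pv_starts_inb maps n m
  | succ t ih =>
      intro p hp
      rcases (pvRL_succ_mem maps n m t p).mp hp with h | ⟨u, hu, hs⟩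
      · exact ih p h
      · exact pv_succs_inB maps n m u (ih u hu).2.2.2.2 p hs

-- v ∈ seen-part of a frontier expansion ↔ already seen or a successor of the frontier
theorem pv_expand_mem_gen (maps : List String) (n m : Int) (s : Int × Int × Int) :
    ∀ (dirs : List (Int × Int)) (st : List (Int × Int × Int) × List (Int × Int × Int))
      (v : Int × Int × Int),
    v ∈ (dirs.foldl (altStep maps n m s) st).2 ↔ v ∈ st.2 ∨
      v ∈ dirs.filterMap (fun d =>
        if 0 ≤ s.1 + d.1 ∧ s.1 + d.1 < n ∧ 0 ≤ s.2.1 + d.2 ∧ s.2.1 + d.2 < m ∧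
            pvCell maps (s.1 + d.1) (s.2.1 + d.2) ≠ 'X' then
          some (s.1 + d.1, s.2.1 + d.2, if pvCell maps (s.1 + d.1) (s.2.1 + d.2) = 'L' then 1 else s.2.2)
        else none) := by
  intro dirs
  induction dirs with
  | nil => intro st v; simp
  | cons d dirs ih =>
      intro st v
      rw [List.foldl_cons, ih]
      by_cases hg : 0 ≤ s.1 + d.1 ∧ s.1 + d.1 < n ∧ 0 ≤ s.2.1 + d.2 ∧ s.2.1 + d.2 < m ∧
          pvCell maps (s.1 + d.1) (s.2.1 + d.2) ≠ 'X'
      · set p : Int × Int × Int :=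
          (s.1 + d.1, s.2.1 + d.2, if pvCell maps (s.1 + d.1) (s.2.1 + d.2) = 'L' then 1 else s.2.2) with hpdef
        have hstep : (altStep maps n m s st d).2 = if p ∈ st.2 then st.2 else st.2 ++ [p] := by
          unfold altStep
          dsimp only
          rw [if_pos hg]
          by_cases hl : pvCell maps (s.1 + d.1) (s.2.1 + d.2) = 'L' <;>
            simp only [hpdef, hl, if_pos] <;> split_ifs <;> simp_all
        rw [List.filterMap_cons, if_pos hg, hstep]
        by_cases hm : p ∈ st.2
        · rw [if_pos hm]
          simp only [List.mem_cons]
          constructor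
          · intro h; rcases h with h | h
            · exact Or.inl h
            · exact Or.inr (Or.inr h)
          · rintro (h | h | h)
            · exact Or.inl h
            · exact Or.inl (h ▸ hm)
            · exact Or.inr h
        · rw [if_neg hm]
          simp only [List.mem_append, List.mem_cons]
          tauto
      · have hstep : altStep maps n m s st d = st := by
          unfold altStep
          dsimp only
          rw [if_neg hg]
        rw [List.filterMap_cons, if_neg hg, hstep]

theorem pv_expand_mem (maps : List String) (n m : Int) (s : Int × Int × Int)
    (st : List (Int × Int × Int) × List (Int × Int × Int)) (v : Int × Int × Int) :
    v ∈ (pvDirs.foldl (altStep maps n m s) st).2 ↔ v ∈ st.2 ∨ v ∈ pvSuccs maps n m s := by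
  rw [pv_expand_mem_gen maps n m s pvDirs st v]
  rfl

theorem pv_expandAll_mem (maps : List String) (n m : Int) :
    ∀ (fr : List (Int × Int × Int)) (st : List (Int × Int × Int) × List (Int × Int × Int))
      (v : Int × Int × Int),
    v ∈ (fr.foldl (altExpand maps n m) st).2 ↔
      v ∈ st.2 ∨ ∃ u ∈ fr, v ∈ pvSuccs maps n m u := by
  intro fr
  induction fr with
  | nil => intro st v; simp
  | cons u fr ih =>
      intro st v
      rw [List.foldl_cons]
      show v ∈ (fr.foldl (altExpand maps n m) (altExpand maps n m st u)).2 ↔ _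
      rw [ih, altExpand, pv_expand_mem]
      simp only [List.mem_cons]
      constructor
      · rintro ((h | h) | ⟨w, hw, hws⟩)
        · exact Or.inl h
        · exact Or.inr ⟨u, Or.inl rfl, h⟩
        · exact Or.inr ⟨w, Or.inr hw, hws⟩
      · rintro (h | ⟨w, (rfl | hw), hws⟩)
        · exact Or.inl (Or.inl h)
        · exact Or.inl (Or.inr hws)
        · exact Or.inr ⟨w, hw, hws⟩

-- ---- the level BFS computes: least level containing the target, else -1
theorem lvl_val (maps : List String) (N M : Nat) (ey ex : Int) (tgtO : Option (Int × Int × Int))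
    (htg : tgtO = some (ey, ex, 1) ∨ (tgtO = none ∧ ey = -1)) :
    ∀ (fB : Nat) (old fr : List (Int × Int × Int)) (tN : Nat),
      (old ++ fr).Nodup →
      (∀ p ∈ old ++ fr, pvInB (N : Int) (M : Int) p) →
      (∀ v, v ∈ old → ∃ t' , tN = t' + 1 ∧ v ∈ pvRL maps N M t') →
      (∀ t', tN = t' + 1 → ∀ v, v ∈ pvRL maps N M t' → v ∈ old) →
      (∀ v, v ∈ fr ↔ (v ∈ pvRL maps N M tN ∧ v ∉ old)) →
      (∀ s, s < tN → pvHitB maps N M tgtO s = false) →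
      1 + (2 * N * M - (old ++ fr).length) ≤ fB →
      (∀ (h : ∃ s, pvHitB maps N M tgtO s = true),
          altLoop maps (N : Int) (M : Int) tgtO fB fr (old ++ fr) (tN : Int)
            = ((Nat.find h : Nat) : Int)) ∧
      ((∀ s, pvHitB maps N M tgtO s = false) →
          altLoop maps (N : Int) (M : Int) tgtO fB fr (old ++ fr) (tN : Int) = -1) := by
  intro fB
  induction fB with
  | zero =>
      intro old fr tN _ _ _ _ _ _ hfB
      exact absurd hfB (by omega)
  | succ fB ih =>
      intro old fr tN hnd hb hold holdc hfr hfound hfB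
      -- no hit at any level once the levels stabilise below a hit-free level
      have hstable : ∀ (t0 : Nat), (∀ v, v ∈ pvRL maps (N : Int) (M : Int) (t0 + 1) →
            v ∈ pvRL maps (N : Int) (M : Int) t0) →
          (∀ s, s ≤ t0 → pvHitB maps N M tgtO s = false) →
          ∀ s, pvHitB maps N M tgtO s = false := by
        intro t0 hst hbelow s
        rcases htgt : tgtO with _ | g
        · rfl
        · simp only [pvHitB, decide_eq_false_iff_not]
          intro hg
          have hg' : g ∈ pvRL maps (N : Int) (M : Int) t0 := by
            rcases le_total s t0 with hle | hle
            · exact pvRL_mono maps _ _ hle hg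
            · exact pvRL_stable maps _ _ t0 hst s hle g hg
          have := hbelow t0 le_rfl
          rw [htgt] at this
          simp only [pvHitB, decide_eq_false_iff_not] at this
          exact this hg'
      by_cases hfre : fr = []
      · subst hfre
        rw [pv_emptyB]
        have hnohit : ∀ s, pvHitB maps N M tgtO s = false := by
          have hsub : ∀ v, v ∈ pvRL maps (N : Int) (M : Int) tN → v ∈ old := by
            intro v hv
            by_cases hvo : v ∈ old
            · exact hvo
            · exact absurd ((hfr v).mpr ⟨hv, hvo⟩) (List.not_mem_nil)
          cases tN with
          | zero =>
              have hempty : ∀ s v, v ∉ pvRL maps (N : Int) (M : Int) s := by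
                intro s
                induction s with
                | zero =>
                    intro v hv
                    rcases hold v (hsub v hv) with ⟨t', ht', _⟩
                    cases ht'
                | succ s ihs =>
                    intro v hv
                    rcases (pvRL_succ_mem maps _ _ s v).mp hv with h | ⟨u, hu, _⟩
                    · exact ihs v h
                    · exact ihs u hu
              intro s
              rcases htgt : tgtO with _ | g
              · rfl
              · simp only [pvHitB, decide_eq_false_iff_not]
                exact hempty s g
          | succ t' =>
              refine hstable t' ?_ ?_
              · intro v hv
                rcases hold v (hsub v hv) with ⟨t'', ht'', hmem⟩
                have he : t'' = t' := by omega
                exact he ▸ hmem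
              · intro s hs
                exact hfound s (by omega)
        refine ⟨fun h => ?_, fun _ => rfl⟩
        rcases h with ⟨s, hs⟩
        rw [hnohit s] at hs
        cases hs
      · rw [altLoop, if_neg hfre]
        have hb' : ∀ p ∈ fr, pvInB (N : Int) (M : Int) p :=
          fun p hp => hb p (List.mem_append_right old hp)
        have hchk : (tgtO.any (fun g => fr.contains g)) = true ↔ pvHitB maps N M tgtO tN = true := by
          rcases htgt : tgtO with _ | g
          · simp [pvHitB]
          · simp only [Option.any_some, List.contains_iff_mem, pvHitB, decide_eq_true_eq]
            constructor
            · intro hgf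
              exact ((hfr g).mp hgf).1
            · intro hgr
              refine (hfr g).mpr ⟨hgr, fun hgo => ?_⟩
              rcases hold g hgo with ⟨t', ht', hmem⟩
              have := hfound t' (by omega)
              rw [htgt] at this
              simp only [pvHitB, decide_eq_false_iff_not] at this
              exact this hmem
        by_cases hfnd : (tgtO.any (fun g => fr.contains g)) = true
        · rw [if_pos hfnd]
          constructor
          · intro h
            have hfind : Nat.find h = tN := by
              rw [Nat.find_eq_iff]
              refine ⟨hchk.mp hfnd, fun s hs hhit => ?_⟩
              rw [hfound s hs] at hhit
              cases hhit
            rw [hfind]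
          · intro hall
            rw [hall tN] at hchk
            exact absurd (hchk.mp hfnd) (by simp)
        · rw [if_neg hfnd]
          have hnot_tN : pvHitB maps N M tgtO tN = false := by
            rcases hb2 : pvHitB maps N M tgtO tN with _ | _
            · rfl
            · exact absurd (hchk.mpr hb2) hfnd
          rcases pv_expandAll_shape maps (N : Int) (M : Int) fr []
              (old ++ fr) (fun s hs => (hb' s hs).2.2.2.2) with ⟨l, hsh, hlb, hln⟩
          simp only [hsh, List.nil_append]
          have hseen_sub : ∀ v, v ∈ old ++ fr → v ∈ pvRL maps (N : Int) (M : Int) tN := by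
            intro v hv
            rcases List.mem_append.mp hv with hv | hv
            · rcases hold v hv with ⟨t', ht', hmem⟩
              exact pvRL_mono maps _ _ (by omega) hmem
            · exact ((hfr v).mp hv).1
          have hdisj : ∀ v, v ∈ l → v ∉ old ++ fr := by
            intro v hv hvs
            exact (List.disjoint_of_nodup_append (hln hnd)) hvs hv
          have hlmem : ∀ v, v ∈ l ↔
              (v ∈ pvRL maps (N : Int) (M : Int) (tN + 1) ∧ v ∉ old ++ fr) := by
            intro v
            have hm : v ∈ (old ++ fr) ++ l ↔
                v ∈ old ++ fr ∨ ∃ u ∈ fr, v ∈ pvSuccs maps (N : Int) (M : Int) u := by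
              have := pv_expandAll_mem maps (N : Int) (M : Int) fr ([], old ++ fr) v
              rw [hsh] at this
              simpa using this
            constructor
            · intro hvl
              have hvin : v ∈ (old ++ fr) ++ l := List.mem_append_right _ hvl
              rcases hm.mp hvin with hv | ⟨u, hu, hsucc⟩
              · exact absurd hv (hdisj v hvl)
              · exact ⟨(pvRL_succ_mem maps _ _ tN v).mpr
                  (Or.inr ⟨u, ((hfr u).mp hu).1, hsucc⟩), hdisj v hvl⟩
            · rintro ⟨hvr, hvs⟩
              rcases (pvRL_succ_mem maps _ _ tN v).mp hvr with hv | ⟨u, hu, hsucc⟩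
              · exfalso
                apply hvs
                by_cases hvo : v ∈ old
                · exact List.mem_append_left fr hvo
                · exact List.mem_append_right old ((hfr v).mpr ⟨hv, hvo⟩)
              · have hu_fr : u ∈ fr := by
                  by_cases huo : u ∈ old
                  · exfalso
                    rcases hold u huo with ⟨t'', ht'', hmem⟩
                    have : v ∈ pvRL maps (N : Int) (M : Int) (t'' + 1) :=
                      (pvRL_succ_mem maps _ _ t'' v).mpr (Or.inr ⟨u, hmem, hsucc⟩)
                    have hvtN : v ∈ pvRL maps (N : Int) (M : Int) tN :=
                      pvRL_mono maps _ _ (by omega) this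
                    apply hvs
                    by_cases hvo : v ∈ old
                    · exact List.mem_append_left fr hvo
                    · exact List.mem_append_right old ((hfr v).mpr ⟨hvtN, hvo⟩)
                  · by_cases huf : u ∈ fr
                    · exact huf
                    · exact absurd ((hfr u).mpr ⟨hu, huo⟩) huf
                have hmv : v ∈ (old ++ fr) ++ l := hm.mpr (Or.inr ⟨u, hu_fr, hsucc⟩)
                rcases List.mem_append.mp hmv with h | h
                · exact absurd h hvs
                · exact h
          by_cases hl0 : l = []
          · subst hl0
            rw [pv_emptyB]
            have hnohit : ∀ s, pvHitB maps N M tgtO s = false := by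
              refine hstable tN ?_ ?_
              · intro v hv
                by_cases hvs : v ∈ old ++ fr
                · exact hseen_sub v hvs
                · exact absurd ((hlmem v).mpr ⟨hv, hvs⟩) (List.not_mem_nil)
              · intro s hs
                rcases Nat.lt_or_ge s tN with h | h
                · exact hfound s h
                · have : s = tN := by omega
                  exact this ▸ hnot_tN
            refine ⟨fun h => ?_, fun _ => rfl⟩
            rcases h with ⟨s, hs⟩
            rw [hnohit s] at hs
            cases hs
          · have hnd' : ((old ++ fr) ++ l).Nodup := hln hnd
            have hball : ∀ p ∈ (old ++ fr) ++ l, pvInB (N : Int) (M : Int) p := by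
              intro p hp
              rcases List.mem_append.mp hp with hp | hp
              · exact hb p hp
              · exact hlb p hp
            have hcard : ((old ++ fr) ++ l).length ≤ 2 * N * M := pv_card N M _ hnd' hball
            have hlp : 0 < l.length := List.length_pos_iff.mpr hl0
            have hlen2 : ((old ++ fr) ++ l).length = (old ++ fr).length + l.length :=
              List.length_append
            have hih := ih (old ++ fr) l (tN + 1) hnd' hball
              (fun v hv => ⟨tN, rfl, hseen_sub v hv⟩)
              (fun t' ht' v hv => by
                have : t' = tN := by omega
                subst this
                by_cases hvo : v ∈ old
                · exact List.mem_append_left fr hvo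
                · exact List.mem_append_right old ((hfr v).mpr ⟨hv, hvo⟩))
              hlmem
              (fun s hs => by
                rcases Nat.lt_or_ge s tN with h | h
                · exact hfound s h
                · have : s = tN := by omega
                  exact this ▸ hnot_tN)
              (by omega)
            have hcast : ((tN : Int) + 1) = (((tN + 1 : Nat)) : Int) := by push_cast; ring
            rw [hcast]
            exact hih

-- ---- generic foldl latch lemmas for the sweep state
theorem pv_foldl_latch {α : Type}
    (f : (((Int × Int × Int) → Int) × Bool) → α → (((Int × Int × Int) → Int) × Bool))
    (hlatch : ∀ st x, st.2 = true → (f st x).2 = true) :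
    ∀ (L : List α) st, st.2 = true → (L.foldl f st).2 = true := by
  intro L
  induction L with
  | nil => intro st h; exact h
  | cons x L ih => intro st h; exact ih _ (hlatch st x h)

theorem pv_foldl_step {α : Type}
    (f : (((Int × Int × Int) → Int) × Bool) → α → (((Int × Int × Int) → Int) × Bool))
    (hlatch : ∀ st x, st.2 = true → (f st x).2 = true)
    (hstep : ∀ st x, f st x = st ∨ (f st x).2 = true) :
    ∀ (L : List α) st, L.foldl f st = st ∨ (L.foldl f st).2 = true := by
  intro L
  induction L with
  | nil => intro st; exact Or.inl rfl
  | cons x L ih =>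
      intro st
      rcases hstep st x with h | h
      · simpa [h] using ih st
      · exact Or.inr (pv_foldl_latch f hlatch L _ h)

theorem pv_foldl_fix {α : Type}
    (f : (((Int × Int × Int) → Int) × Bool) → α → (((Int × Int × Int) → Int) × Bool))
    (hlatch : ∀ st x, st.2 = true → (f st x).2 = true)
    (hstep : ∀ st x, f st x = st ∨ (f st x).2 = true) :
    ∀ (L : List α) st, st.2 = false → L.foldl f st = st → ∀ x ∈ L, f st x = st := by
  intro L
  induction L with
  | nil => intro st _ _ x hx; cases hx
  | cons x L ih =>
      intro st hf hfold y hy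
      rcases hstep st x with h | h
      · rw [List.foldl_cons, h] at hfold
        rcases List.mem_cons.mp hy with rfl | hy
        · exact h
        · exact ih st hf hfold y hy
      · exfalso
        rw [List.foldl_cons] at hfold
        have := pv_foldl_latch f hlatch L _ h
        rw [hfold, hf] at this
        cases this

-- ---- the Bellman-Ford invariant
def pvDinv (maps : List String) (N M : Nat) (dist : (Int × Int × Int) → Int) : Prop :=
  ∀ v, 0 ≤ dist v ∧ dist v ≤ 2 * (N : Int) * (M : Int) ∧
    (dist v = 2 * (N : Int) * (M : Int) ∨ v ∈ pvRL maps (N : Int) (M : Int) (dist v).toNat) ∧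
    (v ∈ altStarts maps (N : Int) (M : Int) → dist v = 0)

def pvStepOk (N M : Nat) (st st' : ((Int × Int × Int) → Int) × Bool) : Prop :=
  (∀ v, st'.1 v ≤ st.1 v) ∧ (st' = st ∨ (st'.2 = true ∧ pvPhi N M st'.1 < pvPhi N M st.1))

theorem pvStepOk_rfl (N M : Nat) (st : ((Int × Int × Int) → Int) × Bool) : pvStepOk N M st st :=
  ⟨fun _ => le_rfl, Or.inl rfl⟩

theorem pvStepOk_trans (N M : Nat) {a b c : ((Int × Int × Int) → Int) × Bool}
    (h1 : pvStepOk N M a b) (h2 : pvStepOk N M b c) : pvStepOk N M a c := by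
  refine ⟨fun v => le_trans (h2.1 v) (h1.1 v), ?_⟩
  rcases h2.2 with h | h
  · rw [h]; exact h1.2
  · rcases h1.2 with h' | h'
    · rw [← h']; exact Or.inr h
    · exact Or.inr ⟨h.1, lt_trans h.2 h'.2⟩

-- sweep step facts for bfRelax / bfCellK
theorem bfRelax_latch (maps : List String) (n m k d : Int)
    (st : ((Int × Int × Int) → Int) × Bool) (p : Int × Int) (h : st.2 = true) :
    (bfRelax maps n m k d st p).2 = true := by
  unfold bfRelax
  dsimp only
  split_ifs <;> simp [h]

theorem bfRelax_step (maps : List String) (n m k d : Int)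
    (st : ((Int × Int × Int) → Int) × Bool) (p : Int × Int) :
    bfRelax maps n m k d st p = st ∨ (bfRelax maps n m k d st p).2 = true := by
  unfold bfRelax
  dsimp only
  split_ifs <;> simp

theorem bfCellK_latch (maps : List String) (n m i j : Int)
    (st : ((Int × Int × Int) → Int) × Bool) (k : Int) (h : st.2 = true) :
    (bfCellK maps n m i j st k).2 = true := by
  unfold bfCellK
  dsimp only
  split_ifs with hd
  · exact h
  · exact pv_foldl_latch _ (fun st x => bfRelax_latch maps n m k _ st x) _ st h

theorem bfCellK_step (maps : List String) (n m i j : Int)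
    (st : ((Int × Int × Int) → Int) × Bool) (k : Int) :
    bfCellK maps n m i j st k = st ∨ (bfCellK maps n m i j st k).2 = true := by
  unfold bfCellK
  dsimp only
  split_ifs with hd
  · exact Or.inl rfl
  · exact pv_foldl_step _ (fun st x => bfRelax_latch maps n m k _ st x)
      (fun st x => bfRelax_step maps n m k _ st x) _ st

-- a neighbour step realises an edge of the state graph
theorem bfNbrs_eq (i j : Int) : bfNbrs i j = pvDirs.map (fun d => (i + d.1, j + d.2)) := by
  simp only [bfNbrs, pvDirs, List.map_cons, List.map_nil, List.cons.injEq, Prod.mk.injEq]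
  norm_num
  constructor <;> ring

theorem mem_pvSuccs_of_nbr (maps : List String) (n m i j k : Int) (p : Int × Int)
    (hp : p ∈ bfNbrs i j)
    (hg : 0 ≤ p.1 ∧ p.1 < n ∧ 0 ≤ p.2 ∧ p.2 < m ∧ pvCell maps p.1 p.2 ≠ 'X') :
    (p.1, p.2, if pvCell maps p.1 p.2 = 'L' then (1 : Int) else k)
      ∈ pvSuccs maps n m (i, j, k) := by
  rw [bfNbrs_eq] at hp
  rcases List.mem_map.mp hp with ⟨dd, hdd, hpe⟩
  subst hpe
  simp only [pvSuccs, List.mem_filterMap]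
  exact ⟨dd, hdd, by rw [if_pos hg]⟩

theorem pv_succs_to_nbr (maps : List String) (n m i j k : Int) (v : Int × Int × Int)
    (hv : v ∈ pvSuccs maps n m (i, j, k)) :
    ∃ p ∈ bfNbrs i j, (0 ≤ p.1 ∧ p.1 < n ∧ 0 ≤ p.2 ∧ p.2 < m ∧ pvCell maps p.1 p.2 ≠ 'X') ∧
      v = (p.1, p.2, if pvCell maps p.1 p.2 = 'L' then (1 : Int) else k) := by
  simp only [pvSuccs, List.mem_filterMap] at hv
  rcases hv with ⟨dd, hd, hif⟩
  by_cases hgg : 0 ≤ i + dd.1 ∧ i + dd.1 < n ∧ 0 ≤ j + dd.2 ∧ j + dd.2 < m ∧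
      pvCell maps (i + dd.1) (j + dd.2) ≠ 'X'
  · rw [if_pos hgg] at hif
    rcases Option.some_inj.mp hif with rfl
    refine ⟨(i + dd.1, j + dd.2), ?_, hgg, rfl⟩
    rw [bfNbrs_eq]
    exact List.mem_map_of_mem hd
  · rw [if_neg hgg] at hif
    cases hif

theorem pv_sum_le (l : List (Int × Int × Int)) (f : (Int × Int × Int) → Nat) (n : Nat)
    (h : ∀ x ∈ l, f x ≤ n) : (l.map f).sum ≤ l.length * n := by
  induction l with
  | nil => simp
  | cons a l ih =>
      simp only [List.map_cons, List.sum_cons, List.length_cons]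
      have h1 := h a (by simp)
      have h2 := ih (fun x hx => h x (by simp [hx]))
      calc f a + (l.map f).sum ≤ n + l.length * n := by omega
        _ = (l.length + 1) * n := by ring

theorem bfRelax_ok (maps : List String) (N M : Nat) (i j k d : Int)
    (hk : k = 0 ∨ k = 1) (hd0 : 0 ≤ d) (hdlt : d < 2 * (N : Int) * (M : Int))
    (hmem : ((i, j, k) : Int × Int × Int) ∈ pvRL maps (N : Int) (M : Int) d.toNat)
    (st : ((Int × Int × Int) → Int) × Bool) (p : Int × Int) (hp : p ∈ bfNbrs i j)
    (hD : pvDinv maps N M st.1) :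
    pvStepOk N M st (bfRelax maps (N : Int) (M : Int) k d st p) ∧
      pvDinv maps N M (bfRelax maps (N : Int) (M : Int) k d st p).1 := by
  unfold bfRelax
  dsimp only
  by_cases hg : 0 ≤ p.1 ∧ p.1 < (N : Int) ∧ 0 ≤ p.2 ∧ p.2 < (M : Int) ∧
      pvCell maps p.1 p.2 ≠ 'X'
  · rw [if_pos hg]
    set q : Int × Int × Int := (p.1, p.2, if pvCell maps p.1 p.2 = 'L' then (1 : Int) else k)
      with hq
    by_cases hlt : d + 1 < st.1 q
    · rw [if_pos hlt]
      have hq22 : q.2.2 = if pvCell maps p.1 p.2 = 'L' then (1 : Int) else k := rfl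
      have hqB : pvInB (N : Int) (M : Int) q := by
        refine ⟨hg.1, hg.2.1, hg.2.2.1, hg.2.2.2.1, ?_⟩
        rw [hq22]
        split_ifs
        · exact Or.inr rfl
        · exact hk
      have hqU : q ∈ pvUniv N M := (mem_pvUniv N M q).mpr hqB
      have hqRL : q ∈ pvRL maps (N : Int) (M : Int) (d.toNat + 1) :=
        (pvRL_succ_mem maps (N : Int) (M : Int) d.toNat q).mpr
          (Or.inr ⟨(i, j, k), hmem, mem_pvSuccs_of_nbr maps (N : Int) (M : Int) i j k p hp hg⟩)
      have hmono : ∀ v, (if v = q then d + 1 else st.1 v) ≤ st.1 v := by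
        intro v
        split_ifs with hv
        · exact hv ▸ le_of_lt hlt
        · exact le_rfl
      constructor
      · refine ⟨fun v => by dsimp only; exact hmono v, Or.inr ⟨rfl, ?_⟩⟩
        refine List.sum_lt_sum _ _ (fun v _ => by dsimp only; have := hmono v; omega)
          ⟨q, hqU, ?_⟩
        dsimp only
        rw [if_pos rfl]
        omega
      · intro v
        dsimp only
        by_cases hv : v = q
        · rw [hv, if_pos rfl]
          refine ⟨by omega, by omega, Or.inr ?_, fun hvS => ?_⟩
          · have he : (d + 1).toNat = d.toNat + 1 := by omega
            rw [he]
            exact hqRL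
          · have h0 : st.1 q = 0 := (hD q).2.2.2 hvS
            omega
        · rw [if_neg hv]
          exact hD v
    · rw [if_neg hlt]
      exact ⟨pvStepOk_rfl N M st, hD⟩
  · rw [if_neg hg]
    exact ⟨pvStepOk_rfl N M st, hD⟩

theorem bf_fold_ok {α : Type}
    (maps : List String) (N M : Nat)
    (f : (((Int × Int × Int) → Int) × Bool) → α → (((Int × Int × Int) → Int) × Bool))
    (L : List α)
    (h : ∀ st x, x ∈ L → pvDinv maps N M st.1 →
      pvStepOk N M st (f st x) ∧ pvDinv maps N M (f st x).1) :
    ∀ st, pvDinv maps N M st.1 →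
      pvStepOk N M st (L.foldl f st) ∧ pvDinv maps N M (L.foldl f st).1 := by
  induction L with
  | nil => intro st hD; exact ⟨pvStepOk_rfl N M st, hD⟩
  | cons x L ih =>
      intro st hD
      have h1 := h st x (by simp) hD
      have h2 := ih (fun st y hy hD' => h st y (by simp [hy]) hD') (f st x) h1.2
      exact ⟨pvStepOk_trans N M h1.1 h2.1, h2.2⟩

theorem bfCellK_ok (maps : List String) (N M : Nat) (i j : Int)
    (st : ((Int × Int × Int) → Int) × Bool) (k : Int) (hk : k = 0 ∨ k = 1)
    (hD : pvDinv maps N M st.1) :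
    pvStepOk N M st (bfCellK maps (N : Int) (M : Int) i j st k) ∧
      pvDinv maps N M (bfCellK maps (N : Int) (M : Int) i j st k).1 := by
  unfold bfCellK
  dsimp only
  split_ifs with hd
  · exact ⟨pvStepOk_rfl N M st, hD⟩
  · have hDv := hD (i, j, k)
    have hd0 : 0 ≤ st.1 (i, j, k) := hDv.1
    have hdlt : st.1 (i, j, k) < 2 * (N : Int) * (M : Int) := lt_of_le_of_ne hDv.2.1 hd
    have hmem : ((i, j, k) : Int × Int × Int)
        ∈ pvRL maps (N : Int) (M : Int) (st.1 (i, j, k)).toNat := by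
      rcases hDv.2.2.1 with h | h
      · exact absurd h hd
      · exact h
    exact bf_fold_ok maps N M _ (bfNbrs i j)
      (fun st' p hp hD' =>
        bfRelax_ok maps N M i j k (st.1 (i, j, k)) hk hd0 hdlt hmem st' p hp hD')
      st hD

-- the whole sweep preserves the invariant and is measured by pvPhi
theorem bf_sweep_ok (maps : List String) (N M : Nat) (dist : (Int × Int × Int) → Int)
    (hD : pvDinv maps N M dist) :
    pvStepOk N M (dist, false) (bfSweep maps (N : Int) (M : Int) dist) ∧
      pvDinv maps N M (bfSweep maps (N : Int) (M : Int) dist).1 := by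
  unfold bfSweep
  refine bf_fold_ok maps N M _ _ (fun st i _ hDi => ?_) (dist, false) hD
  refine bf_fold_ok maps N M _ _ (fun st j _ hDj => ?_) st hDi
  refine bf_fold_ok maps N M _ _ (fun st k hkm hDk => ?_) st hDj
  have hk : k = 0 ∨ k = 1 := by
    simp only [List.mem_cons, List.not_mem_nil, or_false] at hkm
    exact hkm
  exact bfCellK_ok maps N M _ _ st k hk hDk

-- with enough fuel the loop reaches a fixpoint of the sweep
theorem bf_loop_fix (maps : List String) (N M : Nat) :
    ∀ (fuel : Nat) (dist : (Int × Int × Int) → Int), pvDinv maps N M dist →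
      pvPhi N M dist < fuel →
      pvDinv maps N M (bfLoop maps (N : Int) (M : Int) fuel dist) ∧
      bfSweep maps (N : Int) (M : Int) (bfLoop maps (N : Int) (M : Int) fuel dist)
        = (bfLoop maps (N : Int) (M : Int) fuel dist, false) := by
  intro fuel
  induction fuel with
  | zero => intro dist _ hphi; exact absurd hphi (by omega)
  | succ fuel ih =>
      intro dist hD hphi
      have hsw := bf_sweep_ok maps N M dist hD
      have hL : bfLoop maps (N : Int) (M : Int) (fuel + 1) dist
          = (if (bfSweep maps (N : Int) (M : Int) dist).2 then
              bfLoop maps (N : Int) (M : Int) fuel (bfSweep maps (N : Int) (M : Int) dist).1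
            else (bfSweep maps (N : Int) (M : Int) dist).1) := rfl
      rw [hL]
      by_cases hc : (bfSweep maps (N : Int) (M : Int) dist).2 = true
      · rw [if_pos hc]
        have hstrict : pvPhi N M (bfSweep maps (N : Int) (M : Int) dist).1 < pvPhi N M dist := by
          rcases hsw.1.2 with h | h
          · rw [h] at hc; cases hc
          · exact h.2
        exact ih (bfSweep maps (N : Int) (M : Int) dist).1 hsw.2 (by omega)
      · rw [if_neg hc]
        have heq : bfSweep maps (N : Int) (M : Int) dist = (dist, false) := by
          rcases hsw.1.2 with h | h
          · exact h
          · exact absurd h.1 hc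
        rw [heq]
        exact ⟨hD, heq⟩

-- at a fixpoint every edge is relaxed
theorem bf_fix_edges (maps : List String) (N M : Nat) (dist : (Int × Int × Int) → Int)
    (hfix : bfSweep maps (N : Int) (M : Int) dist = (dist, false)) :
    ∀ u, pvInB (N : Int) (M : Int) u → dist u ≠ 2 * (N : Int) * (M : Int) →
      ∀ v ∈ pvSuccs maps (N : Int) (M : Int) u, dist v ≤ dist u + 1 := by
  rintro ⟨i, j, k⟩ hu hINF v hv
  have hck_latch : ∀ (i j : Int) st (x : Int), st.2 = true →
      (bfCellK maps (N : Int) (M : Int) i j st x).2 = true :=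
    fun i j st x h => bfCellK_latch maps (N : Int) (M : Int) i j st x h
  have hcol_latch : ∀ (i : Int) st (j : Int), st.2 = true →
      ((([0, 1] : List Int).foldl (bfCellK maps (N : Int) (M : Int) i j)) st).2 = true :=
    fun i st j h => pv_foldl_latch _ (fun st x => hck_latch i j st x) _ st h
  have hcol_step : ∀ (i : Int) st (j : Int),
      (([0, 1] : List Int).foldl (bfCellK maps (N : Int) (M : Int) i j)) st = st ∨
      ((([0, 1] : List Int).foldl (bfCellK maps (N : Int) (M : Int) i j)) st).2 = true :=
    fun i st j => pv_foldl_step _ (fun st x => hck_latch i j st x)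
      (fun st x => bfCellK_step maps (N : Int) (M : Int) i j st x) _ st
  have hrow_latch : ∀ st (i : Int), st.2 = true →
      ((PySem.List.pyRange 0 (M : Int) 1).foldl (fun st j =>
        ([0, 1] : List Int).foldl (bfCellK maps (N : Int) (M : Int) i j) st) st).2 = true :=
    fun st i h => pv_foldl_latch _ (fun st j => hcol_latch i st j) _ st h
  have hrow_step : ∀ st (i : Int),
      ((PySem.List.pyRange 0 (M : Int) 1).foldl (fun st j =>
        ([0, 1] : List Int).foldl (bfCellK maps (N : Int) (M : Int) i j) st) st) = st ∨
      ((PySem.List.pyRange 0 (M : Int) 1).foldl (fun st j =>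
        ([0, 1] : List Int).foldl (bfCellK maps (N : Int) (M : Int) i j) st) st).2 = true :=
    fun st i => pv_foldl_step _ (fun st j => hcol_latch i st j)
      (fun st j => hcol_step i st j) _ st
  unfold bfSweep at hfix
  have hrow := pv_foldl_fix _ (fun st i => hrow_latch st i) (fun st i => hrow_step st i)
    (PySem.List.pyRange 0 (N : Int) 1) (dist, false) rfl hfix i
    (PySem.List.mem_pyRange_one.mpr ⟨hu.1, hu.2.1⟩)
  have hcol := pv_foldl_fix _ (fun st j => hcol_latch i st j) (fun st j => hcol_step i st j)
    (PySem.List.pyRange 0 (M : Int) 1) (dist, false) rfl hrow j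
    (PySem.List.mem_pyRange_one.mpr ⟨hu.2.2.1, hu.2.2.2.1⟩)
  have hkmem : k ∈ ([0, 1] : List Int) := by
    rcases (show k = 0 ∨ k = 1 from hu.2.2.2.2) with h | h <;> simp [h]
  have hck := pv_foldl_fix _ (fun st x => hck_latch i j st x)
    (fun st x => bfCellK_step maps (N : Int) (M : Int) i j st x)
    ([0, 1] : List Int) (dist, false) rfl hcol k hkmem
  unfold bfCellK at hck
  dsimp only at hck
  rw [if_neg hINF] at hck
  have hnbr := pv_foldl_fix _
    (fun st p => bfRelax_latch maps (N : Int) (M : Int) k (dist (i, j, k)) st p)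
    (fun st p => bfRelax_step maps (N : Int) (M : Int) k (dist (i, j, k)) st p)
    (bfNbrs i j) (dist, false) rfl hck
  rcases pv_succs_to_nbr maps (N : Int) (M : Int) i j k v hv with ⟨p, hpn, hg, hveq⟩
  have happ := hnbr p hpn
  unfold bfRelax at happ
  dsimp only at happ
  rw [if_pos hg] at happ
  by_cases hlt2 : dist (i, j, k) + 1
      < dist (p.1, p.2, if pvCell maps p.1 p.2 = 'L' then (1 : Int) else k)
  · rw [if_pos hlt2] at happ
    have := congrArg Prod.snd happ
    simp at this
  · rw [hveq]
    omega

theorem bf_ub (maps : List String) (N M : Nat) (dist : (Int × Int × Int) → Int)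
    (hD : pvDinv maps N M dist)
    (hfix : bfSweep maps (N : Int) (M : Int) dist = (dist, false)) :
    ∀ (t : Nat), (t : Int) < 2 * (N : Int) * (M : Int) →
      ∀ v ∈ pvRL maps (N : Int) (M : Int) t, dist v ≤ (t : Int) := by
  intro t
  induction t with
  | zero =>
      intro _ v hv
      rw [(hD v).2.2.2 hv]
      simp
  | succ t iht =>
      intro hlt v hv
      have htlt : (t : Int) < 2 * (N : Int) * (M : Int) := by push_cast at hlt ⊢; omega
      rcases (pvRL_succ_mem maps (N : Int) (M : Int) t v).mp hv with h | ⟨u, hu, hsucc⟩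
      · have := iht htlt v h
        push_cast
        omega
      · have hub : dist u ≤ (t : Int) := iht htlt u hu
        have huB : pvInB (N : Int) (M : Int) u := pvRL_inB maps (N : Int) (M : Int) t u hu
        have huINF : dist u ≠ 2 * (N : Int) * (M : Int) := by omega
        have := bf_fix_edges maps N M dist hfix u huB huINF v hsucc
        push_cast
        omega

-- init characterisation
theorem pv_mark0 (S0 : List (Int × Int × Int)) (p : Int × Int × Int) (C : Int) :
    (fun v => if v = p then (0 : Int) else (if v ∈ S0 then 0 else C))
      = (fun v => if v ∈ S0 ++ [p] then (0 : Int) else C) := by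
  funext v
  by_cases h : v = p
  · simp [h]
  · by_cases h2 : v ∈ S0 <;> simp [h, h2]

theorem bf_init_inner (maps : List String) (n m i : Int) (js : List Int) :
    ∀ (S0 : List (Int × Int × Int)) (e : Option (Int × Int)) (ey ex : Int),
      pvEndRel e ey ex →
      ∃ ey' ex',
        js.foldl (fun st j =>
            let st := if pvCell maps i j = 'S' then
                ((fun v => if v = (i, j, (0 : Int)) then 0 else st.1 v), st.2)
              else st
            if pvCell maps i j = 'E' then (st.1, i, j) else st)
          ((fun v => if v ∈ S0 then (0 : Int) else 2 * n * m), ey, ex)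
        = ((fun v => if v ∈ S0 ++ js.filterMap
              (fun j => if pvCell maps i j = 'S' then some (i, j, (0 : Int)) else none)
            then (0 : Int) else 2 * n * m), ey', ex')
        ∧ pvEndRel (js.foldl (fun e j => if pvCell maps i j = 'E' then some (i, j) else e) e) ey' ex' := by
  induction js with
  | nil => exact fun S0 e ey ex h => ⟨ey, ex, by simp, h⟩
  | cons j js ih =>
      intro S0 e ey ex h
      simp only [List.foldl_cons]
      by_cases cS : pvCell maps i j = 'S'
      · have cE : ¬ pvCell maps i j = 'E' := by rw [cS]; decide
        rw [if_neg cE, if_pos cS, pv_mark0]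
        rcases ih (S0 ++ [(i, j, (0 : Int))]) e ey ex h with ⟨ey', ex', h1, h2⟩
        refine ⟨ey', ex', ?_, ?_⟩
        · rw [h1]
          simp [cS, List.append_assoc]
        · simpa [cE] using h2
      · by_cases cE : pvCell maps i j = 'E'
        · rw [if_pos cE, if_neg cS]
          rcases ih S0 (some (i, j)) i j ⟨rfl, rfl⟩ with ⟨ey', ex', h1, h2⟩
          refine ⟨ey', ex', ?_, ?_⟩
          · rw [show (((fun v => if v ∈ S0 then (0 : Int) else 2 * n * m), ey, ex).1,
                  i, j) = ((fun v => if v ∈ S0 then (0 : Int) else 2 * n * m), i, j) from rfl]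
            rw [h1]
            simp [cS]
          · simpa [cE] using h2
        · rw [if_neg cE, if_neg cS]
          rcases ih S0 e ey ex h with ⟨ey', ex', h1, h2⟩
          refine ⟨ey', ex', ?_, ?_⟩
          · rw [h1]
            simp [cS]
          · simpa [cE] using h2

theorem bf_init_outer (maps : List String) (n m : Int) (is : List Int) :
    ∀ (S0 : List (Int × Int × Int)) (e : Option (Int × Int)) (ey ex : Int),
      pvEndRel e ey ex →
      ∃ ey' ex',
        is.foldl (fun st i =>
            (PySem.List.pyRange 0 m 1).foldl (fun st j =>
              let st := if pvCell maps i j = 'S' then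
                  ((fun v => if v = (i, j, (0 : Int)) then 0 else st.1 v), st.2)
                else st
              if pvCell maps i j = 'E' then (st.1, i, j) else st) st)
          ((fun v => if v ∈ S0 then (0 : Int) else 2 * n * m), ey, ex)
        = ((fun v => if v ∈ S0 ++ is.flatMap (fun i => (PySem.List.pyRange 0 m 1).filterMap
              (fun j => if pvCell maps i j = 'S' then some (i, j, (0 : Int)) else none))
            then (0 : Int) else 2 * n * m), ey', ex')
        ∧ pvEndRel (is.foldl (fun e i => (PySem.List.pyRange 0 m 1).foldl
            (fun e j => if pvCell maps i j = 'E' then some (i, j) else e) e) e) ey' ex' := by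
  induction is with
  | nil => exact fun S0 e ey ex h => ⟨ey, ex, by simp, h⟩
  | cons i is ih =>
      intro S0 e ey ex h
      simp only [List.foldl_cons]
      rcases bf_init_inner maps n m i (PySem.List.pyRange 0 m 1) S0 e ey ex h with ⟨ey1, ex1, h1, h2⟩
      rw [h1]
      rcases ih (S0 ++ (PySem.List.pyRange 0 m 1).filterMap
          (fun j => if pvCell maps i j = 'S' then some (i, j, (0 : Int)) else none))
          ((PySem.List.pyRange 0 m 1).foldl (fun e j => if pvCell maps i j = 'E' then some (i, j) else e) e)
          ey1 ex1 h2 with ⟨ey', ex', h3, h4⟩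
      rw [h3]
      refine ⟨ey', ex', ?_, h4⟩
      refine congrArg (fun f => (f, ey', ex')) ?_
      funext v
      rw [List.flatMap_cons, List.append_assoc]

theorem bf_init (maps : List String) (n m : Int) :
    ∃ ey ex, bfInit maps n m
      = ((fun v => if v ∈ altStarts maps n m then 0 else 2 * n * m), ey, ex)
      ∧ pvEndRel (altEnd maps n m) ey ex := by
  unfold bfInit altStarts altEnd
  rcases bf_init_outer maps n m (PySem.List.pyRange 0 n 1) [] none (-1) (-1) ⟨rfl, rfl⟩ with ⟨ey, ex, h1, h2⟩
  refine ⟨ey, ex, ?_, h2⟩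
  rw [show ((fun _ : Int × Int × Int => 2 * n * m), (-1 : Int), (-1 : Int))
      = ((fun v => if v ∈ ([] : List (Int × Int × Int)) then (0 : Int) else 2 * n * m),
         (-1 : Int), (-1 : Int)) from by
    refine congrArg (fun f => (f, (-1 : Int), (-1 : Int))) ?_
    funext v
    simp]
  rw [h1]
  refine congrArg (fun f => (f, ey, ex)) ?_
  funext v
  rw [List.nil_append]

theorem pv_end_inner_nonneg (maps : List String) (i : Int) (hi : 0 ≤ i) (js : List Int) :
    ∀ e, (∀ q : Int × Int, e = some q → 0 ≤ q.1) →
      ∀ q : Int × Int,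
        js.foldl (fun e j => if pvCell maps i j = 'E' then some (i, j) else e) e = some q →
        0 ≤ q.1 := by
  induction js with
  | nil => intro e he; exact he
  | cons j js ih =>
      intro e he
      simp only [List.foldl_cons]
      apply ih
      intro q hq
      split_ifs at hq with c
      · rcases Option.some_inj.mp hq with rfl
        exact hi
      · exact he q hq

theorem pv_end_nonneg (maps : List String) (n m : Int) (p : Int × Int)
    (h : altEnd maps n m = some p) : 0 ≤ p.1 := by
  unfold altEnd at h
  have hgen : ∀ (is : List Int), (∀ i ∈ is, 0 ≤ i) →
      ∀ e, (∀ q : Int × Int, e = some q → 0 ≤ q.1) →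
      ∀ q : Int × Int,
        is.foldl (fun e i => (PySem.List.pyRange 0 m 1).foldl
          (fun e j => if pvCell maps i j = 'E' then some (i, j) else e) e) e = some q →
        0 ≤ q.1 := by
    intro is
    induction is with
    | nil => intro _ e he; exact he
    | cons i is ih =>
        intro hall e he
        simp only [List.foldl_cons]
        apply ih (fun x hx => hall x (by simp [hx]))
        exact pv_end_inner_nonneg maps i (hall i (by simp)) (PySem.List.pyRange 0 m 1) e he
  exact hgen (PySem.List.pyRange 0 n 1)
    (fun i hi => (PySem.List.mem_pyRange_one.mp hi).1) none (by rintro q ⟨⟩) p h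

theorem pvRL_all_empty (maps : List String) (n m : Int)
    (h0 : ∀ v, v ∉ pvRL maps n m 0) : ∀ s v, v ∉ pvRL maps n m s := by
  intro s
  induction s with
  | zero => exact h0
  | succ s ih =>
      intro v hv
      rcases (pvRL_succ_mem maps n m s v).mp hv with h | ⟨u, hu, _⟩
      · exact ih v h
      · exact ih u hu

-- least reachable level is below 2*N*M
theorem pv_find_lt (maps : List String) (N M : Nat) (g : Int × Int × Int)
    (h : ∃ s, pvHitB maps (N : Int) (M : Int) (some g) s = true) :
    Nat.find h + 1 ≤ 2 * N * M := by
  set s0 := Nat.find h with hs0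
  have hg : g ∈ pvRL maps (N : Int) (M : Int) s0 := by
    rw [hs0]
    simpa [pvHitB] using Nat.find_spec h
  have hgrow : ∀ t, t < s0 →
      (pvRL maps (N : Int) (M : Int) t).toFinset ⊂ (pvRL maps (N : Int) (M : Int) (t + 1)).toFinset := by
    intro t ht
    rw [Finset.ssubset_iff_subset_ne]
    constructor
    · intro x hx
      rw [List.mem_toFinset] at hx ⊢
      exact pvRL_mono maps _ _ (Nat.le_succ t) hx
    · intro he
      have hst : ∀ v, v ∈ pvRL maps (N : Int) (M : Int) (t + 1) →
          v ∈ pvRL maps (N : Int) (M : Int) t := by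
        intro v hv
        have hx : v ∈ (pvRL maps (N : Int) (M : Int) (t + 1)).toFinset := List.mem_toFinset.mpr hv
        rw [← he] at hx
        exact List.mem_toFinset.mp hx
      have hgt : g ∈ pvRL maps (N : Int) (M : Int) t :=
        pvRL_stable maps _ _ t hst s0 (by omega) g hg
      have hle : Nat.find h ≤ t := Nat.find_le (by simpa [pvHitB] using hgt)
      omega
  have hcard : ∀ t, t ≤ s0 → t + 1 ≤ (pvRL maps (N : Int) (M : Int) t).toFinset.card := by
    intro t
    induction t with
    | zero =>
        intro _
        by_contra hc
        have hcard0 : (pvRL maps (N : Int) (M : Int) 0).toFinset = ∅ :=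
          Finset.card_eq_zero.mp (by omega)
        have hemp : ∀ v, v ∉ pvRL maps (N : Int) (M : Int) 0 := by
          intro v hv
          have hx : v ∈ (pvRL maps (N : Int) (M : Int) 0).toFinset := List.mem_toFinset.mpr hv
          rw [hcard0] at hx
          exact absurd hx (Finset.notMem_empty v)
        exact pvRL_all_empty maps (N : Int) (M : Int) hemp s0 g hg
    | succ t iht =>
        intro hts
        have h1 := iht (by omega)
        have h2 := Finset.card_lt_card (hgrow t (by omega))
        omega
  have hsub : (pvRL maps (N : Int) (M : Int) s0).toFinset ⊆ (pvUniv N M).toFinset := by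
    intro x hx
    rw [List.mem_toFinset] at hx ⊢
    exact (mem_pvUniv N M x).mpr (pvRL_inB maps (N : Int) (M : Int) s0 x hx)
  have hb := Finset.card_le_card hsub
  have hlen := List.toFinset_card_le (pvUniv N M)
  have hc := hcard s0 le_rfl
  rw [pvUniv_len] at hlen
  omega

-- B computes the same answer as the level BFS
theorem pv_equiv (maps : List String) (hpre : Pre_solution maps) :
    solution maps = solution_alt maps := by
  simp only [solution, solution_alt]
  have hM0 : 0 ≤ PySem.Str.len ((PySem.List.pyGet? maps 0).getD "") := by
    rw [PySem.Str.len_eq]; positivity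
  obtain ⟨M, hM⟩ : ∃ Mn : Nat, PySem.Str.len ((PySem.List.pyGet? maps 0).getD "") = (Mn : Int) :=
    ⟨(PySem.Str.len ((PySem.List.pyGet? maps 0).getD "")).toNat, by omega⟩
  set N := maps.length with hN
  rw [hM]
  simp only [Int.toNat_natCast]
  rcases pv_init maps (N : Int) (M : Int) with ⟨ey, ex, hinit, hrel⟩
  rw [hinit]
  rcases bf_init maps (N : Int) (M : Int) with ⟨ey2, ex2, hbinit, hrel2⟩
  rw [hbinit]
  dsimp only
  set dist0 : (Int × Int × Int) → Int :=
    (fun v => if v ∈ altStarts maps (N : Int) (M : Int) then 0 else 2 * (N : Int) * (M : Int))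
    with hdist0
  have hD0 : pvDinv maps N M dist0 := by
    intro v
    simp only [hdist0]
    by_cases hv : v ∈ altStarts maps (N : Int) (M : Int)
    · rw [if_pos hv]
      exact ⟨le_rfl, by positivity, Or.inr hv, fun _ => rfl⟩
    · rw [if_neg hv]
      exact ⟨by positivity, le_rfl, Or.inl rfl, fun hs => absurd hs hv⟩
  have hINFtn : (2 * (N : Int) * (M : Int)).toNat = 2 * N * M := by
    have he : (2 * (N : Int) * (M : Int)) = ((2 * N * M : Nat) : Int) := by push_cast; ring
    rw [he, Int.toNat_natCast]
  have hphi : pvPhi N M dist0 < 2 * N * M * (2 * N * M) + 1 := by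
    have hbound : ∀ v ∈ pvUniv N M, (dist0 v).toNat ≤ 2 * N * M := by
      intro v _
      simp only [hdist0]
      by_cases hv : v ∈ altStarts maps (N : Int) (M : Int)
      · rw [if_pos hv]; omega
      · rw [if_neg hv, hINFtn]
    have hs := pv_sum_le (pvUniv N M) (fun v => (dist0 v).toNat) (2 * N * M) hbound
    rw [pvUniv_len] at hs
    exact lt_of_le_of_lt hs (by omega)
  have hloop := bf_loop_fix maps N M (2 * N * M * (2 * N * M) + 1) dist0 hD0 hphi
  set dstar := bfLoop maps (N : Int) (M : Int) (2 * N * M * (2 * N * M) + 1) dist0 with hdstar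
  have hDs := hloop.1
  have hfix := hloop.2
  have hnd := pv_starts_nodup maps (N : Int) (M : Int)
  have hinb := pv_starts_inb maps (N : Int) (M : Int)
  have hcard := pv_card N M _ hnd hinb
  rcases hE : altEnd maps (N : Int) (M : Int) with _ | p
  · -- no exit cell: both return -1
    rw [hE] at hrel hrel2
    have hmain := pv_main maps N M ey ex none (Or.inr ⟨rfl, hrel.1⟩)
      (2 * N * M + 2) (2 * N * M + 1) (altStarts maps (N : Int) (M : Int))
      (altStarts maps (N : Int) (M : Int)) 0 hnd hinb (fun q hq => hq)
      (by omega) (by omega)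
    have hlvl := lvl_val maps N M ey ex none (Or.inr ⟨rfl, hrel.1⟩)
      (2 * N * M + 2) [] (altStarts maps (N : Int) (M : Int)) 0
      hnd hinb
      (fun v hv => absurd hv (List.not_mem_nil))
      (fun t' ht' => absurd ht' (by omega))
      (fun v => ⟨fun hv => ⟨hv, List.not_mem_nil⟩, fun h => h.1⟩)
      (fun s hs => absurd hs (by omega))
      (by omega)
    have hA := hlvl.2 (fun s => rfl)
    simp only [Nat.cast_zero, List.nil_append] at hA
    rw [hmain, hA, if_pos hrel2.1]
  · rw [hE] at hrel hrel2
    have hp0 : 0 ≤ p.1 := pv_end_nonneg maps (N : Int) (M : Int) p hE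
    have htg : some (p.1, p.2, (1 : Int)) = some (ey, ex, 1) ∨
        (some (p.1, p.2, (1 : Int)) = none ∧ ey = -1) :=
      Or.inl (by rw [hrel.1, hrel.2])
    have hmain := pv_main maps N M ey ex (some (p.1, p.2, (1 : Int))) htg
      (2 * N * M + 2) (2 * N * M + 1) (altStarts maps (N : Int) (M : Int))
      (altStarts maps (N : Int) (M : Int)) 0 hnd hinb (fun q hq => hq)
      (by omega) (by omega)
    have hlvl := lvl_val maps N M ey ex (some (p.1, p.2, (1 : Int))) htg
      (2 * N * M + 2) [] (altStarts maps (N : Int) (M : Int)) 0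
      hnd hinb
      (fun v hv => absurd hv (List.not_mem_nil))
      (fun t' ht' => absurd ht' (by omega))
      (fun v => ⟨fun hv => ⟨hv, List.not_mem_nil⟩, fun h => h.1⟩)
      (fun s hs => absurd hs (by omega))
      (by omega)
    rw [hmain, hrel2.1, hrel2.2, if_neg (by omega)]
    by_cases hEx : ∃ s, pvHitB maps (N : Int) (M : Int) (some (p.1, p.2, (1 : Int))) s = true
    · have hA := hlvl.1 hEx
      simp only [Nat.cast_zero, List.nil_append] at hA
      rw [hA]
      have hs0 : Nat.find hEx + 1 ≤ 2 * N * M := pv_find_lt maps N M (p.1, p.2, 1) hEx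
      have hgmem : ((p.1, p.2, (1 : Int)) : Int × Int × Int)
          ∈ pvRL maps (N : Int) (M : Int) (Nat.find hEx) := by
        simpa [pvHitB] using Nat.find_spec hEx
      have hcastlt : ((Nat.find hEx : Nat) : Int) < 2 * (N : Int) * (M : Int) := by
        have : ((Nat.find hEx : Nat) : Int) + 1 ≤ ((2 * N * M : Nat) : Int) := by exact_mod_cast hs0
        push_cast at this
        omega
      have hub := bf_ub maps N M dstar hDs hfix (Nat.find hEx) hcastlt (p.1, p.2, 1) hgmem
      have hDg := hDs (p.1, p.2, 1)
      have hlt : dstar (p.1, p.2, 1) < 2 * (N : Int) * (M : Int) := by omega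
      rw [if_pos hlt]
      rcases hDg.2.2.1 with hI | hmem2
      · omega
      · have hfle : Nat.find hEx ≤ (dstar (p.1, p.2, 1)).toNat :=
          Nat.find_le (by simpa [pvHitB] using hmem2)
        omega
    · have hall : ∀ s, pvHitB maps (N : Int) (M : Int) (some (p.1, p.2, (1 : Int))) s = false := by
        intro s
        rcases hb : pvHitB maps (N : Int) (M : Int) (some (p.1, p.2, (1 : Int))) s with _ | _
        · rfl
        · exact absurd ⟨s, hb⟩ hEx
      have hA := hlvl.2 hall
      simp only [Nat.cast_zero, List.nil_append] at hA
      rw [hA]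
      rcases (hDs (p.1, p.2, 1)).2.2.1 with hI | hmem2
      · rw [if_neg (by omega)]
      · exact absurd ⟨(dstar (p.1, p.2, 1)).toNat, by simpa [pvHitB] using hmem2⟩ hEx

-- ===== VERDICT (by name: the statement is the Claim_ definition above) =====
theorem solution_spec : Claim_equal_solution := by
  intro maps _ hpre
  unfold Spec_solution
  exact pv_equiv maps hpre
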